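-- pv_equiv track=rewrite | github.com/samjazaaa/AoC | 2023/07/joker.py | is_three
-- ===== SOURCE A (Python) =====
-- def is_three(cards):
--     if not "J" in cards:
--         for c in cards:
--             if cards.count(c) == 3:
--                 return True
--         return False
--
--     jokers = cards.count("J")
--     cleaned = cards.replace("J", "")
--
--     if jokers >= 2:
--         return True
--
--     # only 1 Joker
--     return is_pair(cleaned)
--
-- def is_pair(cards):
--     if "J" in cards:
--         return True
--
--     for c in cards:
--         if cards.count(c) == 2:
--             return True
--     return False
-- ===== SOURCE B (Python) =====
-- def is_three(cards):
--     jokers = cards.count("J")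
--     if jokers >= 2:
--         return True
--     target = 3 - jokers
--     s = sorted(c for c in cards if c != "J")
--     i, n = 0, len(s)
--     while i < n:
--         j = i
--         while j < n and s[j] == s[i]:
--             j += 1
--         if j - i == target:
--             return True
--         i = j
--     return False
-- ===== Notes on version B (the rewrite author's own statement) =====
-- stated objective: faster
-- what changed: B sorts the non-joker cards and makes one run-length scan over the sorted list looking for a run of length exactly 3 - jokers, replacing A's per-card .count() rescans, its replace() pass and the is_pair helper by a sort-then-scan algorithm.
import Mathlib
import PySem

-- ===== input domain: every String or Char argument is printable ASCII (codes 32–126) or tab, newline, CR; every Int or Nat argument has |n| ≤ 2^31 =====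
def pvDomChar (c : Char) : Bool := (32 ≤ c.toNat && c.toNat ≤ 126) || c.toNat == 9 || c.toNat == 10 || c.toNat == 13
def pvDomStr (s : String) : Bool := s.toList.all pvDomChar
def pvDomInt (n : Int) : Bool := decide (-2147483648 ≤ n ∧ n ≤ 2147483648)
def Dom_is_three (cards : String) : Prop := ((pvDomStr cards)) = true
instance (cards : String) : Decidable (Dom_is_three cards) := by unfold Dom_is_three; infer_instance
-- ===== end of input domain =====

-- B sorts the non-joker cards and scans the sorted list once for a run of length exactly
-- 3 - jokers (returning True immediately when jokers >= 2), replacing A's per-card .count()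
-- rescans, replace() pass and is_pair helper by a sort-then-run-length-scan.

-- ===== PORT A =====
-- 'for c in cards: if cards.count(c) == 3: return True' (ported on the list side; Str.count_eq bridges)
def isThreeLoop (s : List Char) : List Char → Bool
  | [] => false
  | c :: t => if PySem.Chars.count s [c] = 3 then true else isThreeLoop s t

def isPairLoop (s : List Char) : List Char → Bool
  | [] => false
  | c :: t => if PySem.Chars.count s [c] = 2 then true else isPairLoop s t

def is_pair (cards : String) : Bool :=
  if PySem.Str.isIn "J" cards then true
  else isPairLoop cards.toList cards.toList

def is_three (cards : String) : Bool :=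
  if !(PySem.Str.isIn "J" cards) then isThreeLoop cards.toList cards.toList
  else
    let jokers := PySem.Str.count cards "J"
    let cleaned := PySem.Str.replace cards "J" ""
    if 2 ≤ jokers then true
    else is_pair cleaned

-- ===== PORT B =====
-- the outer while loop of Source B: take the run of cards equal to the first one (inner while),
-- compare its length with target, continue after the run
def runScan (target : Int) : List Char → Bool
  | [] => false
  | c :: t =>
    if ((t.takeWhile (fun d => d == c)).length + 1 : Int) == target then true
    else runScan target (t.dropWhile (fun d => d == c))
termination_by l => l.length
decreasing_by
  have := List.length_dropWhile_le (fun d => d == c) t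
  simpa using Nat.lt_succ_of_le this

def is_three_alt (cards : String) : Bool :=
  let jokers := PySem.Str.count cards "J"
  if 2 ≤ jokers then true
  else
    let target : Int := 3 - (jokers : Int)
    let s := PySem.List.sorted (cards.toList.filter (fun c => !(c == 'J'))) (fun c => c) false
    runScan target s

-- ===== PRECONDITION & SPEC =====
def Spec_is_three (cards : String) (out : Bool) : Prop := out = is_three_alt cards
instance (cards : String) (out : Bool) : Decidable (Spec_is_three cards out) := by unfold Spec_is_three; infer_instance

-- ===== CLAIM (what is proved, stated in full; the proofs are below) =====
def Claim_equal_is_three : Prop := ∀ (cards : String), Dom_is_three cards → Spec_is_three cards (is_three cards)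

-- ===== LEMMAS AND PROOFS =====

-- Python s.count(c) for a single-character needle equals the list count.
theorem count_go_singleton (v : Char) : ∀ (fuel : Nat) (l : List Char) (acc : Nat),
    l.length ≤ fuel → PySem.Chars.count.go [v] fuel l acc = acc + l.count v := by
  intro fuel
  induction fuel with
  | zero =>
    intro l acc h
    cases l with
    | nil => simp [PySem.Chars.count.go]
    | cons c t => simp at h
  | succ n ih =>
    intro l acc h
    cases l with
    | nil => simp [PySem.Chars.count.go]
    | cons c t =>
      simp only [PySem.Chars.count.go]
      by_cases hv : c = v
      · subst hv
        simp [List.isPrefixOf, ih t (acc + 1) (by simpa using Nat.le_of_succ_le_succ h)]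
        omega
      · simp [List.isPrefixOf, hv, ih t acc (by simpa using Nat.le_of_succ_le_succ h), Ne.symm hv]

theorem count_singleton (l : List Char) (v : Char) :
    PySem.Chars.count l [v] = l.count v := by
  simp [PySem.Chars.count, count_go_singleton v l.length l 0 le_rfl]

-- s.replace(c, "") for a single character filters that character out.
theorem replace_go_singleton (v : Char) : ∀ (fuel : Nat) (l : List Char) (acc : List Char),
    l.length ≤ fuel →
    PySem.Chars.replace.go [v] [] fuel l acc = acc.reverse ++ l.filter (fun c => !(c == v)) := by
  intro fuel
  induction fuel with
  | zero =>
    intro l acc h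
    cases l with
    | nil => simp [PySem.Chars.replace.go]
    | cons c t => simp at h
  | succ n ih =>
    intro l acc h
    cases l with
    | nil => simp [PySem.Chars.replace.go]
    | cons c t =>
      simp only [PySem.Chars.replace.go]
      by_cases hv : c = v
      · subst hv
        simp [List.isPrefixOf, ih t acc (by simpa using Nat.le_of_succ_le_succ h)]
      · simp [List.isPrefixOf, hv, ih t (c :: acc) (by simpa using Nat.le_of_succ_le_succ h), Ne.symm hv]

theorem replace_singleton_nil (l : List Char) (v : Char) :
    PySem.Chars.replace l [v] [] = l.filter (fun c => !(c == v)) := by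
  simp [PySem.Chars.replace, replace_go_singleton v l.length l [] le_rfl]

-- 'c in s' for a single character is list membership.
theorem isIn_singleton (v : Char) (l : List Char) :
    PySem.Chars.isIn [v] l = l.contains v := by
  by_cases h : v ∈ l
  · rw [show l.contains v = true by simpa using h]
    rw [PySem.Chars.isIn_iff_infix]
    obtain ⟨s, t, rfl⟩ := List.append_of_mem h
    exact ⟨s, t, by simp⟩
  · rw [show l.contains v = false by simpa using h]
    rw [PySem.Chars.isIn_eq_false_iff]
    intro ⟨s, t, e⟩
    exact h (by rw [← e]; simp)

theorem isThreeLoop_any (s : List Char) : ∀ t, isThreeLoop s t = t.any (fun c => s.count c == 3) := by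
  intro t
  induction t with
  | nil => rfl
  | cons c t ih =>
    simp only [isThreeLoop, List.any_cons, count_singleton, ih]
    by_cases h : s.count c = 3 <;> simp [h]

theorem isPairLoop_any (s : List Char) : ∀ t, isPairLoop s t = t.any (fun c => s.count c == 2) := by
  intro t
  induction t with
  | nil => rfl
  | cons c t ih =>
    simp only [isPairLoop, List.any_cons, count_singleton, ih]
    by_cases h : s.count c = 2 <;> simp [h]

-- after dropping the leading run of c from a sorted tail, every element is strictly above c
theorem dropWhile_gt (c : Char) : ∀ (l : List Char), l.Pairwise (· ≤ ·) → (∀ e ∈ l, c ≤ e) →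
    ∀ e ∈ l.dropWhile (fun d => d == c), c < e := by
  intro l
  induction l with
  | nil => intro _ _ e he; simp [List.dropWhile] at he
  | cons a t ih =>
    intro hp hle e he
    by_cases ha : a = c
    · subst ha
      rw [List.dropWhile_cons_of_pos (by simp)] at he
      exact ih (List.Pairwise.of_cons hp) (fun e he' => hle e (by simp [he'])) e he
    · rw [List.dropWhile_cons_of_neg (by simp [ha])] at he
      have hca : c < a := lt_of_le_of_ne (hle a (by simp)) (Ne.symm ha)
      rcases List.mem_cons.mp he with rfl | he'
      · exact hca
      · exact lt_of_lt_of_le hca ((List.pairwise_cons.mp hp).1 e he')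

-- on a sorted list, the run scan finds exactly the characters whose count equals the target
theorem runScan_spec_aux (tgt : Int) : ∀ (n : Nat) (m : List Char), m.length ≤ n →
    m.Pairwise (· ≤ ·) →
    runScan tgt m = m.any (fun c => ((m.count c : Int) == tgt)) := by
  intro n
  induction n with
  | zero =>
    intro m h _
    have : m = [] := List.eq_nil_of_length_eq_zero (Nat.le_zero.mp h)
    subst this; simp [runScan]
  | succ n ih =>
    intro m hlen hp
    cases m with
    | nil => simp [runScan]
    | cons c t =>
      have hle : ∀ e ∈ t, c ≤ e := (List.pairwise_cons.mp hp).1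
      have hpt : t.Pairwise (· ≤ ·) := (List.pairwise_cons.mp hp).2
      have hsplit : t.takeWhile (fun d => d == c) ++ t.dropWhile (fun d => d == c) = t :=
        List.takeWhile_append_dropWhile
      have htwc : ∀ e ∈ t.takeWhile (fun d => d == c), e = c := by
        intro e he; simpa using List.mem_takeWhile_imp he
      have hgt : ∀ e ∈ t.dropWhile (fun d => d == c), c < e := dropWhile_gt c t hpt hle
      -- count of c in the whole list is the leading run length + 1
      have hcnt_tw : (t.takeWhile (fun d => d == c)).count c =
          (t.takeWhile (fun d => d == c)).length :=
        List.count_eq_length.mpr (fun b hb => (htwc b hb).symm)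
      have hcnt_dw : (t.dropWhile (fun d => d == c)).count c = 0 :=
        List.count_eq_zero.mpr (fun h => lt_irrefl c (hgt c h))
      have hcnt_c : (c :: t).count c = (t.takeWhile (fun d => d == c)).length + 1 := by
        rw [List.count_cons_self]
        conv_lhs => rw [← hsplit]
        rw [List.count_append, hcnt_tw, hcnt_dw]
      -- beyond the run, counts in the whole list and in the remainder agree
      have hcnt_rest : ∀ e ∈ t.dropWhile (fun d => d == c),
          (c :: t).count e = (t.dropWhile (fun d => d == c)).count e := by
        intro e he
        have hec : e ≠ c := fun h => lt_irrefl c (h ▸ hgt e he)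
        have hetw : (t.takeWhile (fun d => d == c)).count e = 0 :=
          List.count_eq_zero.mpr (fun h => hec (htwc e h))
        rw [List.count_cons_of_ne hec.symm]
        conv_lhs => rw [← hsplit]
        rw [List.count_append, hetw, Nat.zero_add]
      have hdw_any : (t.dropWhile (fun d => d == c)).any
            (fun e => (((t.dropWhile (fun d => d == c)).count e : Int) == tgt))
          = (t.dropWhile (fun d => d == c)).any
            (fun e => (((c :: t).count e : Int) == tgt)) :=
        PySem.List.any_congr_mem (fun e he => by rw [hcnt_rest e he])
      have hih : runScan tgt (t.dropWhile (fun d => d == c))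
          = (t.dropWhile (fun d => d == c)).any
            (fun e => (((c :: t).count e : Int) == tgt)) := by
        rw [ih _ (le_trans (List.length_dropWhile_le _ t) (Nat.le_of_succ_le_succ hlen))
            (List.Pairwise.sublist (List.dropWhile_sublist _) hpt), hdw_any]
      have hPc : (((c :: t).count c : Int) == tgt)
          = (((t.takeWhile (fun d => d == c)).length + 1 : Int) == tgt) := by
        rw [hcnt_c]; push_cast; rfl
      have htw_any : ∀ P : Char → Bool,
          (t.takeWhile (fun d => d == c)).any P = true → P c = true := by
        intro P h
        obtain ⟨e, he, hPe⟩ := List.any_eq_true.mp h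
        rwa [htwc e he] at hPe
      have hsplit_any : ∀ P : Char → Bool, t.any P
          = ((t.takeWhile (fun d => d == c)).any P || (t.dropWhile (fun d => d == c)).any P) := by
        intro P
        conv_lhs => rw [← hsplit]
        exact List.any_append
      rw [runScan]
      by_cases hc : (((t.takeWhile (fun d => d == c)).length + 1 : Int) == tgt) = true
      · rw [if_pos hc]
        have hPt : (((c :: t).count c : Int) == tgt) = true := by rw [hPc]; exact hc
        rw [List.any_cons, hPt, Bool.true_or]
      · rw [if_neg hc, hih]
        have hPcf : (((c :: t).count c : Int) == tgt) = false := by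
          rw [hPc]; simpa using hc
        have htwA : ((t.takeWhile (fun d => d == c)).any
            (fun e => ((((c :: t).count e : Int)) == tgt))) = false := by
          cases hA : ((t.takeWhile (fun d => d == c)).any
              (fun e => ((((c :: t).count e : Int)) == tgt))) with
          | false => rfl
          | true =>
            have := htw_any _ hA
            rw [hPcf] at this; exact absurd this (by simp)
        rw [List.any_cons, hPcf, Bool.false_or, hsplit_any, htwA, Bool.false_or]
  
theorem runScan_spec (tgt : Int) (m : List Char) (hp : m.Pairwise (· ≤ ·)) :
    runScan tgt m = m.any (fun c => ((m.count c : Int) == tgt)) :=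
  runScan_spec_aux tgt m.length m le_rfl hp

-- runScan over sorted(l) answers 'does some character of l occur exactly tgt times in l'
theorem runScan_sorted (tgt : Int) (l : List Char) :
    runScan tgt (PySem.List.sorted l (fun c => c) false)
      = l.any (fun c => ((l.count c : Int) == tgt)) := by
  have hperm : (PySem.List.sorted l (fun c => c) false).Perm l := PySem.List.sorted_perm l _ _
  rw [runScan_spec tgt _ (PySem.List.sorted_pairwise l _)]
  have hcnt : ∀ c, (PySem.List.sorted l (fun c => c) false).count c = l.count c :=
    fun c => hperm.count_eq c
  rw [PySem.List.any_congr_mem (fun e _ => by rw [hcnt e])]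
  apply Bool.eq_iff_iff.mpr
  simp only [List.any_eq_true]
  exact ⟨fun ⟨c, hc, h⟩ => ⟨c, hperm.mem_iff.mp hc, h⟩,
         fun ⟨c, hc, h⟩ => ⟨c, hperm.mem_iff.mpr hc, h⟩⟩

theorem is_three_eq (cards : String) : is_three cards = is_three_alt cards := by
  have hJ : PySem.Str.isIn "J" cards = cards.toList.contains 'J' := by
    rw [PySem.Str.isIn_eq]; exact isIn_singleton 'J' cards.toList
  have hcnt : PySem.Str.count cards "J" = cards.toList.count 'J' := by
    rw [PySem.Str.count_eq]; exact count_singleton _ _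
  unfold is_three is_three_alt
  rw [hJ, hcnt]
  by_cases hmem : 'J' ∈ cards.toList
  · have hb : cards.toList.contains 'J' = true := by simpa using hmem
    rw [hb]
    simp only [Bool.not_true, Bool.false_eq_true, if_false]
    by_cases h2 : 2 ≤ cards.toList.count 'J'
    · rw [if_pos h2, if_pos h2]
    · have h1 : cards.toList.count 'J' = 1 := by
        have := List.count_pos_iff.mpr hmem; omega
      rw [if_neg h2, if_neg h2]
      unfold is_pair
      have hclean : (PySem.Str.replace cards "J" "").toList
          = cards.toList.filter (fun c => !(c == 'J')) := by
        rw [PySem.Str.toList_replace]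
        exact replace_singleton_nil _ _
      have hnoJ : (cards.toList.filter (fun c => !(c == 'J'))).contains 'J' = false := by simp
      rw [PySem.Str.isIn_eq, hclean, show "J".toList = ['J'] from rfl, isIn_singleton, hnoJ]
      simp only [Bool.false_eq_true, if_false]
      rw [isPairLoop_any, runScan_sorted, h1]
      norm_num
      congr 1
      funext c
      apply Bool.eq_iff_iff.mpr
      simp
      omega
  · have hb : cards.toList.contains 'J' = false := by simpa using hmem
    have h0 : cards.toList.count 'J' = 0 := List.count_eq_zero.mpr hmem
    rw [hb]
    simp only [Bool.not_false, if_true]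
    rw [h0, if_neg (by norm_num)]
    have hfil : cards.toList.filter (fun c => !(c == 'J')) = cards.toList := by
      apply List.filter_eq_self.mpr
      intro c hc
      simp only [Bool.not_eq_eq_eq_not, Bool.not_true, beq_eq_false_iff_ne]
      rintro rfl; exact hmem hc
    rw [hfil, isThreeLoop_any, runScan_sorted]
    norm_num
    congr 1
    funext c
    apply Bool.eq_iff_iff.mpr
    simp
    omega

-- ===== VERDICT (by name: the statement is the Claim_ definition above) =====
theorem is_three_spec : Claim_equal_is_three := by
  intro cards _
  exact is_three_eq cards
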